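-- pv_equiv track=rewrite | github.com/adasiek01/list_3 | ex2_easy.py | ordinary_polynomial_value_calc
-- ===== SOURCE A (Python) =====
-- def ordinary_polynomial_value_calc(coeff, arg):
--     """
--     Function that counts how many multiplications we do to calculate the value of a polynomial of degree n
--     :param coeff: list of coefficients of a polynomial (from the smallest to the biggest)
--     :param arg: argument of the faction
--     :return: value of the polynomial, amount of multiplications, amount of additions
--     """
--     value = 0
--     count_mult = 0
--     count_add = 0
--     expo = 1
--     for a in coeff[1:]:
--         value += a*(arg**expo)
--         count_add += 1
--         count_mult += expo
--         expo += 1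
--     value += coeff[0]
--     count_add += 1
--     return value, count_mult, count_add
-- ===== SOURCE B (Python) =====
-- def ordinary_polynomial_value_calc(coeff, arg):
--     value = coeff[0]
--     power = 1
--     for a in coeff[1:]:
--         power *= arg
--         value += a * power
--     n = len(coeff) - 1
--     return value, n * (n + 1) // 2, n + 1
-- ===== Notes on version B (the rewrite author's own statement) =====
-- stated objective: faster
-- what changed: B keeps an incremental running power (one multiply per term) instead of recomputing arg**expo each iteration, and replaces the accumulated operation counters by the closed forms n*(n+1)//2 and n+1.
-- outside the precondition, e.g. on ordinary_polynomial_value_calc([], 5): A raises IndexError, B raises IndexError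
import Mathlib
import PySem

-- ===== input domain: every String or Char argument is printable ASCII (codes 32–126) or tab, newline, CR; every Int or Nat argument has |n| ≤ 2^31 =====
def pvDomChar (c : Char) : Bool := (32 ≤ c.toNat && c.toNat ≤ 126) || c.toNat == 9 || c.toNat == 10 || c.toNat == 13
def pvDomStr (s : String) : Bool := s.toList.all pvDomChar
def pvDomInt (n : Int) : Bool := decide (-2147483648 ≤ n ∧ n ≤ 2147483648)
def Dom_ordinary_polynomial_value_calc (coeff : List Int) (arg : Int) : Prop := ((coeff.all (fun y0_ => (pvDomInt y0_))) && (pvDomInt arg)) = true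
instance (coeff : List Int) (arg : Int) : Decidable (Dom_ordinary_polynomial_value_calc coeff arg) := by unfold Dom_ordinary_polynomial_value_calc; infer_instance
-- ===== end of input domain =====

-- B replaces A's repeated exponentiation by a running power and the counter loop by closed forms (objective: faster).
-- A raises IndexError on coeff = [] (coeff[0]); B raises there too; Pre_ excludes the empty list.

-- ===== PORT A =====
def aLoop (arg : Int) : List Int → Int × Int × Int × Int → Int × Int × Int × Int
  | [], s => s
  | a :: rest, (v, cm, ca, e) => aLoop arg rest (v + a * arg ^ e.toNat, cm + e, ca + 1, e + 1)

def ordinary_polynomial_value_calc (coeff : List Int) (arg : Int) : Int × Int × Int :=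
  let s := aLoop arg (PySem.List.slice coeff (some 1) none) (0, 0, 0, 1)
  -- 'value += coeff[0]': coeff[0] via pyGetD, total only under Pre_ (coeff ≠ [])
  (s.1 + PySem.List.pyGetD coeff 0 0, s.2.1, s.2.2.1 + 1)

-- ===== PORT B =====
def bLoop (arg : Int) : List Int → Int × Int → Int × Int
  | [], s => s
  | a :: rest, (v, p) => bLoop arg rest (v + a * (p * arg), p * arg)

def ordinary_polynomial_value_calc_alt (coeff : List Int) (arg : Int) : Int × Int × Int :=
  let v := (bLoop arg (PySem.List.slice coeff (some 1) none) (PySem.List.pyGetD coeff 0 0, 1)).1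
  let n : Int := (coeff.length : Int) - 1
  (v, PySem.Int.floordiv (n * (n + 1)) 2, n + 1)

-- ===== PRECONDITION & SPEC =====
-- Pre_: A (and B) raise IndexError on the empty coefficient list (coeff[0]).
def Pre_ordinary_polynomial_value_calc (coeff : List Int) (arg : Int) : Prop := coeff ≠ []
instance (coeff : List Int) (arg : Int) : Decidable (Pre_ordinary_polynomial_value_calc coeff arg) := by unfold Pre_ordinary_polynomial_value_calc; infer_instance
def pvWitness_ordinary_polynomial_value_calc : List Int × Int := ([1, 2, 3], 2)

def Spec_ordinary_polynomial_value_calc (coeff : List Int) (arg : Int) (out : Int × Int × Int) : Prop := out = ordinary_polynomial_value_calc_alt coeff arg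
instance (coeff : List Int) (arg : Int) (out : Int × Int × Int) : Decidable (Spec_ordinary_polynomial_value_calc coeff arg out) := by unfold Spec_ordinary_polynomial_value_calc; infer_instance

-- ===== CLAIM (what is proved, stated in full; the proofs are below) =====
def Claim_equal_ordinary_polynomial_value_calc : Prop := ∀ (coeff : List Int) (arg : Int), Dom_ordinary_polynomial_value_calc coeff arg → Pre_ordinary_polynomial_value_calc coeff arg → Spec_ordinary_polynomial_value_calc coeff arg (ordinary_polynomial_value_calc coeff arg)

-- ===== LEMMAS AND PROOFS =====
def sumFrom : Nat → Nat → Nat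
  | _, 0 => 0
  | e, n + 1 => e + sumFrom (e + 1) n

theorem sumFrom_succ_two_mul : ∀ (n e : Nat), 2 * sumFrom (e + 1) n = n * (2 * e + n + 1) := by
  intro n
  induction n with
  | zero => intro e; simp [sumFrom]
  | succ n ih =>
      intro e
      simp only [sumFrom, Nat.mul_add]
      rw [ih (e + 1)]
      ring

theorem loop_eq (arg : Int) : ∀ (l : List Int) (v w cm ca : Int) (e : Nat),
    aLoop arg l (v, cm, ca, (e : Int) + 1) =
      (v - w + (bLoop arg l (w, arg ^ e)).1,
       cm + (sumFrom (e + 1) l.length : Int),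
       ca + (l.length : Int),
       (e : Int) + 1 + (l.length : Int)) := by
  intro l
  induction l with
  | nil => intro v w cm ca e; simp [aLoop, bLoop, sumFrom]
  | cons a rest ih =>
      intro v w cm ca e
      have he : ((e : Int) + 1).toNat = e + 1 := by omega
      simp only [aLoop, bLoop, he]
      have hcast : (e : Int) + 1 + 1 = ((e + 1 : Nat) : Int) + 1 := by push_cast; ring
      rw [hcast, ih (v + a * arg ^ (e + 1)) (w + a * (arg ^ e * arg)) (cm + ((e : Int) + 1)) (ca + 1) (e + 1)]
      rw [← pow_succ]
      simp only [sumFrom, List.length_cons]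
      refine Prod.ext ?_ (Prod.ext ?_ (Prod.ext ?_ ?_)) <;> push_cast <;> ring

-- ===== VERDICT (by name: the statement is the Claim_ definition above) =====
theorem ordinary_polynomial_value_calc_spec : Claim_equal_ordinary_polynomial_value_calc := by
  intro coeff arg _ hpre
  unfold Spec_ordinary_polynomial_value_calc
  cases coeff with
  | nil => exact absurd rfl hpre
  | cons c t =>
      unfold ordinary_polynomial_value_calc ordinary_polynomial_value_calc_alt
      rw [PySem.List.slice_from_one]
      simp only [List.tail_cons, PySem.List.pyGetD_zero_cons]
      have h0 : (1 : Int) = ((0 : Nat) : Int) + 1 := by norm_num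
      rw [h0, loop_eq arg t 0 c 0 0 0]
      have hs : ((t.length : Int) + 1 - 1) * ((t.length : Int) + 1 - 1 + 1)
          = ((2 * sumFrom 1 t.length : Nat) : Int) := by
        have := sumFrom_succ_two_mul t.length 0
        push_cast
        push_cast at this
        nlinarith [this]
      have hfd : PySem.Int.floordiv (((2 * sumFrom 1 t.length : Nat) : Int)) 2
          = ((sumFrom 1 t.length : Nat) : Int) := by
        have := PySem.Int.floordiv_natCast (2 * sumFrom 1 t.length) 2
        rw [show ((2 : Nat) : Int) = (2 : Int) by norm_num] at this
        rw [this]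
        norm_num
      simp only [List.length_cons, pow_zero]
      push_cast
      rw [show ((t.length : Int) + 1 - 1) * ((t.length : Int) + 1 - 1 + 1)
          = ((2 * sumFrom 1 t.length : Nat) : Int) from by push_cast at hs ⊢; linarith [hs]]
      rw [hfd]
      refine Prod.ext ?_ (Prod.ext ?_ ?_) <;> push_cast <;> ring
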